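-- pv_equiv track=rewrite | github.com/RyanPaSmith/WayBackScraping | scripts/second iteration/wayback_scraper_fixed.py | pick_seed_urls_for_year
-- ===== SOURCE A (Python) =====
-- KEY_INDEX_RULES = {
--     "investor_home": [
--         "investor-relations/default",
--         "investor-relations/index",
--         "/investor-relations/",
--         "/investor/",
--         "/investors/",
--     ],
--     "earnings_index": [
--         "results.cfm",
--         "earnings",
--         "quarterly-results",
--         "financial-results",
--         "results",
--     ],
--     "sec_index": [
--         "sec.cfm",
--         "sec-filings",
--         "/sec/",
--         "/filings",
--     ],
--     "press_index": [
--         "press-release",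
--         "press-releases",
--         "newsroom",
--         "/news/",
--         "/press/",
--         "/pr/",
--     ],
--     "annual_reports_index": [
--         "annual-report",
--         "annual-reports",
--         "financial-history",
--         "financials.cfm",
--         "proxy",
--     ],
--     "governance_index": [
--         "governance",
--         "leadership-and-governance",
--         "corporate-governance",
--     ],
--     "esg_index": [
--         "/esg/",
--         "environment-social-governance",
--         "sustainability",
--         "responsibility",
--     ],
-- }
--
-- def infer_page_key(url: str) -> str:
--     lower_url = (url or "").lower()
--
--     for page_key, hints in KEY_INDEX_RULES.items():
--         for hint in hints:
--             if hint in lower_url: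
--                 return page_key
--
--     return "other"
--
-- def score_seed_url(url: str, page_key: str) -> tuple:
--     lower_url = url.lower()
--     hint_hits = sum(1 for hint in KEY_INDEX_RULES.get(page_key, []) if hint in lower_url)
--     shorter_is_better = -len(lower_url)
--     https_bonus = 1 if lower_url.startswith("https://") else 0
--     return (hint_hits, https_bonus, shorter_is_better)
--
-- def pick_seed_urls_for_year(discovered_urls: list[str]) -> list[tuple[str, str]]:
--     grouped = {}
--
--     for url in discovered_urls:
--         page_key = infer_page_key(url)
--         if page_key == "other":
--             continue
--         grouped.setdefault(page_key, []).append(url)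
--
--     selected = []
--     for page_key, urls in sorted(grouped.items()):
--         best_url = sorted(urls, key=lambda u: score_seed_url(u, page_key), reverse=True)[0]
--         selected.append((page_key, best_url))
--
--     return selected
-- ===== SOURCE B (Python) =====
-- # Single pass with a running best-per-key dict instead of group-then-sort; ties keep the first url (strict '<' update).
-- KEY_INDEX_RULES = {
--     "investor_home": [
--         "investor-relations/default",
--         "investor-relations/index",
--         "/investor-relations/",
--         "/investor/",
--         "/investors/",
--     ],
--     "earnings_index": [
--         "results.cfm",
--         "earnings",
--         "quarterly-results",
--         "financial-results",
--         "results",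
--     ],
--     "sec_index": [
--         "sec.cfm",
--         "sec-filings",
--         "/sec/",
--         "/filings",
--     ],
--     "press_index": [
--         "press-release",
--         "press-releases",
--         "newsroom",
--         "/news/",
--         "/press/",
--         "/pr/",
--     ],
--     "annual_reports_index": [
--         "annual-report",
--         "annual-reports",
--         "financial-history",
--         "financials.cfm",
--         "proxy",
--     ],
--     "governance_index": [
--         "governance",
--         "leadership-and-governance",
--         "corporate-governance",
--     ],
--     "esg_index": [
--         "/esg/",
--         "environment-social-governance",
--         "sustainability",
--         "responsibility",
--     ],
-- }
--
-- def infer_page_key(url: str) -> str: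
--     lower_url = (url or "").lower()
--     for page_key, hints in KEY_INDEX_RULES.items():
--         for hint in hints:
--             if hint in lower_url:
--                 return page_key
--     return "other"
--
-- def score_seed_url(url: str, page_key: str) -> tuple:
--     lower_url = url.lower()
--     hint_hits = sum(1 for hint in KEY_INDEX_RULES.get(page_key, []) if hint in lower_url)
--     shorter_is_better = -len(lower_url)
--     https_bonus = 1 if lower_url.startswith("https://") else 0
--     return (hint_hits, https_bonus, shorter_is_better)
--
-- def pick_seed_urls_for_year(discovered_urls: list[str]) -> list[tuple[str, str]]:
--     best = {}
--     for url in discovered_urls: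
--         page_key = infer_page_key(url)
--         if page_key == "other":
--             continue
--         score = score_seed_url(url, page_key)
--         cur = best.get(page_key)
--         if cur is None or cur[0] < score:
--             best[page_key] = (score, url)
--     return [(key, best[key][1]) for key in sorted(best)]
-- ===== Notes on version B (the rewrite author's own statement) =====
-- stated objective: alternative
-- what changed: A groups urls into per-key lists and then, for each key, sorts the whole group by score (reverse=True) to take its head; B makes one pass keeping only the best (score, url) pair per key in a dict, updating on strictly greater score so ties keep the first url, and finally reads the urls off the sorted keys.
import Mathlib
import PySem

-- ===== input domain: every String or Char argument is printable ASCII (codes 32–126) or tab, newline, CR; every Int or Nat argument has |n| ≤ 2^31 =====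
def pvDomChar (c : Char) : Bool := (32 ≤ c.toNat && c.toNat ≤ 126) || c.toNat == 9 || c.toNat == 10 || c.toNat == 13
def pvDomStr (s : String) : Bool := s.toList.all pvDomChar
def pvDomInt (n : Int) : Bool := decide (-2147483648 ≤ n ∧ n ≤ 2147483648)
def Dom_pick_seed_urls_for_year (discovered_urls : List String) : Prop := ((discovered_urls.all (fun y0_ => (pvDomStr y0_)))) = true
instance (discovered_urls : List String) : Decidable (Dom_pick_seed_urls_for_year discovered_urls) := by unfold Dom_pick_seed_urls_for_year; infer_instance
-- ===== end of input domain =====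

-- B replaces A's group-then-sort-per-group structure by one pass keeping the best-scoring url per key
-- in a dict (strict '>' update, so ties keep the first url, as A's stable reverse sort does).

-- ===== PORT A =====
-- module constant KEY_INDEX_RULES (a dict; iterated in insertion order, so kept as a list of pairs)
def keyIndexRules : List (String × List String) :=
  [ ("investor_home",
      ["investor-relations/default", "investor-relations/index", "/investor-relations/",
       "/investor/", "/investors/"]),
    ("earnings_index",
      ["results.cfm", "earnings", "quarterly-results", "financial-results", "results"]),
    ("sec_index",
      ["sec.cfm", "sec-filings", "/sec/", "/filings"]),
    ("press_index",
      ["press-release", "press-releases", "newsroom", "/news/", "/press/", "/pr/"]),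
    ("annual_reports_index",
      ["annual-report", "annual-reports", "financial-history", "financials.cfm", "proxy"]),
    ("governance_index",
      ["governance", "leadership-and-governance", "corporate-governance"]),
    ("esg_index",
      ["/esg/", "environment-social-governance", "sustainability", "responsibility"]) ]

-- helper infer_page_key: '(url or "")' equals url for a str argument (lower "" = ""); the
-- nested for-loops with an early return are List.find? over the rules in order.
def infer_page_key (url : String) : String :=
  let lower_url := PySem.Str.lower url
  match keyIndexRules.find? (fun p => p.2.any (fun hint => PySem.Str.isIn hint lower_url)) with
  | some p => p.1
  | none => "other"

-- helper score_seed_url; sum(1 for hint … if hint in lower_url) is countP (a Nat, cast to Int)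
def score_seed_url (url : String) (page_key : String) : Int × Int × Int :=
  let lower_url := PySem.Str.lower url
  let hint_hits : Int := (((PySem.Dict.ofList keyIndexRules).getD page_key []).countP
      (fun hint => PySem.Str.isIn hint lower_url) : Nat)
  let shorter_is_better : Int := -(PySem.Str.len lower_url)
  let https_bonus : Int := if PySem.Str.startswith lower_url "https://" then 1 else 0
  (hint_hits, https_bonus, shorter_is_better)

-- Python compares score tuples LEXICOGRAPHICALLY; Mathlib's order on '×' is pointwise, so the sort
-- key is the same triple through the order synonym 'Lex' (exactly Python's tuple order).
def encScore (s : Int × Int × Int) : Lex (Int × Lex (Int × Int)) :=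
  toLex (s.1, toLex (s.2.1, s.2.2))

-- grouped.setdefault(k, []).append(url) sets grouped[k] = grouped.get(k, []) + [url], i.e. Dict.modify;
-- sorted(grouped.items()) compares tuples, and keys are distinct, so it is the sort by first component;
-- [0] of the per-group sort: groups are nonempty, ported as headD "" (the default is never read).
def pick_seed_urls_for_year (discovered_urls : List String) : List (String × String) :=
  let grouped : PySem.Dict String (List String) :=
    discovered_urls.foldl (fun d url =>
      let page_key := infer_page_key url
      if page_key == "other" then d
      else d.modify page_key [] (fun l => l ++ [url])) PySem.Dict.empty
  (PySem.List.sorted grouped.items (fun p => p.1) false).map (fun p =>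
    (p.1, (PySem.List.sorted p.2 (fun u => encScore (score_seed_url u p.1)) true).headD ""))

-- ===== PORT B =====
-- Python's strict '<' on the score triples (tuple comparison is lexicographic)
def tripleLt (s t : Int × Int × Int) : Bool :=
  s.1 < t.1 || (s.1 == t.1 && (s.2.1 < t.2.1 || (s.2.1 == t.2.1 && s.2.2 < t.2.2)))

-- best[key] in the comprehension can never miss (key ∈ best), ported as getD with a dummy
def pick_seed_urls_for_year_alt (discovered_urls : List String) : List (String × String) :=
  let best : PySem.Dict String ((Int × Int × Int) × String) :=
    discovered_urls.foldl (fun d url =>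
      let page_key := infer_page_key url
      if page_key == "other" then d
      else
        let score := score_seed_url url page_key
        match d.get? page_key with
        | none => d.insert page_key (score, url)
        | some cur => if tripleLt cur.1 score then d.insert page_key (score, url) else d)
      PySem.Dict.empty
  (PySem.List.sorted best.keys (fun k => k) false).map (fun k =>
    (k, (best.getD k ((0, 0, 0), "")).2))

-- ===== PRECONDITION & SPEC =====
def Spec_pick_seed_urls_for_year (discovered_urls : List String) (out : List (String × String)) : Prop := out = pick_seed_urls_for_year_alt discovered_urls
instance (discovered_urls : List String) (out : List (String × String)) : Decidable (Spec_pick_seed_urls_for_year discovered_urls out) := by unfold Spec_pick_seed_urls_for_year; infer_instance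

-- ===== CLAIM (what is proved, stated in full; the proofs are below) =====
def Claim_equal_pick_seed_urls_for_year : Prop := ∀ (discovered_urls : List String), Dom_pick_seed_urls_for_year discovered_urls → Spec_pick_seed_urls_for_year discovered_urls (pick_seed_urls_for_year discovered_urls)

-- ===== LEMMAS AND PROOFS =====

-- the step of A's grouping loop and of B's best-keeping loop, and B's per-key accumulator
def stepA (d : PySem.Dict String (List String)) (url : String) : PySem.Dict String (List String) :=
  let page_key := infer_page_key url
  if page_key == "other" then d
  else d.modify page_key [] (fun l => l ++ [url])

def stepB (d : PySem.Dict String ((Int × Int × Int) × String)) (url : String) :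
    PySem.Dict String ((Int × Int × Int) × String) :=
  let page_key := infer_page_key url
  if page_key == "other" then d
  else
    let score := score_seed_url url page_key
    match d.get? page_key with
    | none => d.insert page_key (score, url)
    | some cur => if tripleLt cur.1 score then d.insert page_key (score, url) else d

def bstep (k : String) (acc : Option ((Int × Int × Int) × String)) (u : String) :
    Option ((Int × Int × Int) × String) :=
  match acc with
  | none => some (score_seed_url u k, u)
  | some cur => if tripleLt cur.1 (score_seed_url u k) then some (score_seed_url u k, u) else acc

lemma tripleLt_iff_enc (s t : Int × Int × Int) : tripleLt s t = decide (encScore s < encScore t) := by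
  rcases s with ⟨a, b, c⟩; rcases t with ⟨d, e, f⟩
  simp only [tripleLt, encScore, Prod.Lex.lt_iff, ofLex_toLex]
  by_cases had : a = d <;> by_cases hbe : b = e <;> simp [had, hbe]

-- the head-tracking abstraction of the reverse insertion sort
def optOf (k : String) (ys : List String) : Option ((Int × Int × Int) × String) :=
  match ys with
  | [] => none
  | y :: _ => some (score_seed_url y k, y)

lemma optOf_foldl_insertBy (k : String) (g : List String) :
    ∀ (ys : List String),
      optOf k (g.foldl (fun acc x =>
          PySem.List.insertBy (fun a b =>
            decide (encScore (score_seed_url b k) < encScore (score_seed_url a k))) x acc) ys) =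
        g.foldl (bstep k) (optOf k ys) := by
  induction g with
  | nil => intro ys; rfl
  | cons x g ih =>
    intro ys
    rw [List.foldl_cons, List.foldl_cons, ih]
    congr 1
    cases ys with
    | nil => rfl
    | cons y ys' =>
      show optOf k (PySem.List.insertBy _ x (y :: ys')) = bstep k (some (score_seed_url y k, y)) x
      by_cases h : tripleLt (score_seed_url y k) (score_seed_url x k) = true
      · have h' : decide (encScore (score_seed_url y k) < encScore (score_seed_url x k)) = true := by
          rw [← tripleLt_iff_enc]; exact h
        simp [PySem.List.insertBy, h', bstep, h, optOf]
      · have h' : decide (encScore (score_seed_url y k) < encScore (score_seed_url x k)) = false := by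
          rw [← tripleLt_iff_enc]; exact Bool.eq_false_iff.mpr h
        simp [PySem.List.insertBy, h', bstep, h, optOf]

-- A's per-group pick equals B's running-best fold
lemma pick_eq_fold (k : String) (g : List String) :
    (PySem.List.sorted g (fun u => encScore (score_seed_url u k)) true).headD "" =
      ((g.foldl (bstep k) none).map Prod.snd).getD "" := by
  rw [PySem.List.sorted_rev_eq_foldl_insertBy]
  have h := optOf_foldl_insertBy k g []
  simp only [optOf] at h
  cases hfold : g.foldl (fun acc x =>
      PySem.List.insertBy (fun a b =>
        decide (encScore (score_seed_url b k) < encScore (score_seed_url a k))) x acc) [] with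
  | nil =>
    rw [hfold] at h
    simp only [optOf] at h
    simp [← h]
  | cons y t =>
    rw [hfold] at h
    simp only [optOf] at h
    simp [← h]

-- A's grouping loop: the group stored at a key k ≠ "other" is the subsequence inferred to k
lemma grouped_getD (urls : List String) :
    ∀ (d : PySem.Dict String (List String)) (k : String), k ≠ "other" →
      (urls.foldl stepA d).getD k [] = d.getD k [] ++ urls.filter (fun u => infer_page_key u == k) := by
  induction urls with
  | nil => intro d k hk; simp
  | cons u urls ih =>
    intro d k hk
    rw [List.foldl_cons, ih _ _ hk]
    by_cases ho : infer_page_key u = "other"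
    · have hne : (infer_page_key u == k) = false := by
        simp only [beq_eq_false_iff_ne, ne_eq, ho]
        exact fun h => hk h.symm
      simp [stepA, ho, List.filter_cons, hne]
      exact fun h => hk h.symm
    · have hgd : stepA d u = d.insert (infer_page_key u) (d.getD (infer_page_key u) [] ++ [u]) := by
        simp [stepA, ho, PySem.Dict.modify]
      rw [hgd, PySem.Dict.getD_insert, List.filter_cons]
      by_cases he : infer_page_key u = k
      · simp [he]
      · have hne : (infer_page_key u == k) = false := by
          simp only [beq_eq_false_iff_ne, ne_eq]; exact he
        simp [hne]
        exact fun h => (he h.symm).elim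

-- B's loop: the running best stored at a key k ≠ "other" is the fold of bstep over that subsequence
lemma best_get? (urls : List String) :
    ∀ (d : PySem.Dict String ((Int × Int × Int) × String)) (k : String), k ≠ "other" →
      (urls.foldl stepB d).get? k =
        (urls.filter (fun u => infer_page_key u == k)).foldl (bstep k) (d.get? k) := by
  induction urls with
  | nil => intro d k hk; simp
  | cons u urls ih =>
    intro d k hk
    rw [List.foldl_cons, ih _ _ hk, List.filter_cons]
    by_cases he : infer_page_key u = k
    · have hb : (infer_page_key u == k) = true := by simp [he]
      have hstep : (stepB d u).get? k = bstep k (d.get? k) u := by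
        have ho : ¬ (infer_page_key u == "other") = true := by
          simp only [beq_iff_eq, he]; exact hk
        simp only [stepB, if_neg ho, he]
        cases hg : d.get? k with
        | none => simp [bstep, hg, PySem.Dict.get?_insert_self, hk]
        | some cur =>
          by_cases hlt : tripleLt cur.1 (score_seed_url u k) = true
          · simp [bstep, hg, hlt, PySem.Dict.get?_insert_self, hk]
          · simp [bstep, hg, Bool.eq_false_iff.mpr hlt]
      simp [hb, hstep]
    · have hb : (infer_page_key u == k) = false := by
        simp only [beq_eq_false_iff_ne, ne_eq]; exact he
      have hstep : (stepB d u).get? k = d.get? k := by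
        by_cases ho : infer_page_key u = "other"
        · simp [stepB, ho]
        · have ho' : ¬ (infer_page_key u == "other") = true := by
            simp only [beq_iff_eq]; exact ho
          simp only [stepB, if_neg ho']
          cases hg : d.get? (infer_page_key u) with
          | none => exact PySem.Dict.get?_insert_of_ne d _ (fun h => he h.symm)
          | some cur =>
            by_cases hlt : tripleLt cur.1 (score_seed_url u (infer_page_key u)) = true
            · simp only [hlt, if_true]
              exact PySem.Dict.get?_insert_of_ne d _ (fun h => he h.symm)
            · simp [Bool.eq_false_iff.mpr hlt]
      simp [hb, hstep]

-- both loops touch the same keys in the same order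
lemma keys_eq (urls : List String) :
    ∀ (dA : PySem.Dict String (List String)) (dB : PySem.Dict String ((Int × Int × Int) × String)),
      dA.keys = dB.keys → (urls.foldl stepA dA).keys = (urls.foldl stepB dB).keys := by
  induction urls with
  | nil => intro dA dB h; simpa using h
  | cons u urls ih =>
    intro dA dB h
    rw [List.foldl_cons, List.foldl_cons]
    apply ih
    by_cases ho : infer_page_key u = "other"
    · simpa [stepA, stepB, ho] using h
    · have ho' : ¬ (infer_page_key u == "other") = true := by
        simp only [beq_iff_eq]; exact ho
      have hcon : dA.contains (infer_page_key u) = dB.contains (infer_page_key u) := by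
        by_cases hm : infer_page_key u ∈ dB.keys
        · rw [(PySem.Dict.contains_iff_mem_keys dA _).mpr (h ▸ hm),
              (PySem.Dict.contains_iff_mem_keys dB _).mpr hm]
        · have h1 : dA.contains (infer_page_key u) = false := by
            cases hca : dA.contains (infer_page_key u) with
            | false => rfl
            | true => exact absurd (h ▸ (PySem.Dict.contains_iff_mem_keys dA _).mp hca) hm
          have h2 : dB.contains (infer_page_key u) = false := by
            cases hcb : dB.contains (infer_page_key u) with
            | false => rfl
            | true => exact absurd ((PySem.Dict.contains_iff_mem_keys dB _).mp hcb) hm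
          rw [h1, h2]
      simp only [stepA, stepB, if_neg ho']
      cases hg : dB.get? (infer_page_key u) with
      | none =>
        have hcB : dB.contains (infer_page_key u) = false :=
          (PySem.Dict.get?_eq_none_iff_contains dB _).mp hg
        rw [PySem.Dict.modify,
            PySem.Dict.keys_insert_of_not_contains dA _ (hcon.trans hcB),
            PySem.Dict.keys_insert_of_not_contains dB _ hcB, h]
      | some cur =>
        have hcB : dB.contains (infer_page_key u) = true := by
          cases hcb : dB.contains (infer_page_key u) with
          | false => rw [(PySem.Dict.get?_eq_none_iff_contains dB _).mpr hcb] at hg; cases hg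
          | true => rfl
        have hkA : (dA.modify (infer_page_key u) [] (fun l => l ++ [u])).keys = dA.keys :=
          PySem.Dict.keys_insert_of_contains dA _ (hcon.trans hcB)
        by_cases hlt : tripleLt cur.1 (score_seed_url u (infer_page_key u)) = true
        · rw [hkA, h]
          simp only [hlt, if_true]
          exact (PySem.Dict.keys_insert_of_contains dB _ hcB).symm
        · rw [hkA, h]
          simp [Bool.eq_false_iff.mpr hlt]

lemma nodup_keys_foldA (urls : List String) :
    ∀ (d : PySem.Dict String (List String)), d.keys.Nodup → (urls.foldl stepA d).keys.Nodup := by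
  induction urls with
  | nil => intro d h; simpa using h
  | cons u urls ih =>
    intro d h
    rw [List.foldl_cons]
    apply ih
    by_cases ho : infer_page_key u = "other"
    · simpa [stepA, ho] using h
    · have ho' : ¬ (infer_page_key u == "other") = true := by
        simp only [beq_iff_eq]; exact ho
      simp only [stepA, if_neg ho', PySem.Dict.modify]
      exact PySem.Dict.nodup_keys_insert d _ _ h

lemma no_other_foldA (urls : List String) :
    ∀ (d : PySem.Dict String (List String)), (∀ k ∈ d.keys, k ≠ "other") →
      ∀ k ∈ (urls.foldl stepA d).keys, k ≠ "other" := by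
  induction urls with
  | nil => intro d h; simpa using h
  | cons u urls ih =>
    intro d h
    rw [List.foldl_cons]
    apply ih
    by_cases ho : infer_page_key u = "other"
    · simpa [stepA, ho] using h
    · have ho' : ¬ (infer_page_key u == "other") = true := by
        simp only [beq_iff_eq]; exact ho
      simp only [stepA, if_neg ho', PySem.Dict.modify]
      intro k hm
      rcases (PySem.Dict.mem_keys_insert d _ k _).mp hm with hke | hkd
      · exact hke ▸ ho
      · exact h k hkd

lemma insertBy_map {α β κ : Type} [LT κ] [DecidableLT κ] (g : α → β) (kb : β → κ) (x : α) :
    ∀ (ys : List α),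
      (PySem.List.insertBy (fun a b => decide (kb (g a) < kb (g b))) x ys).map g =
        PySem.List.insertBy (fun a b => decide (kb a < kb b)) (g x) (ys.map g) := by
  intro ys
  induction ys with
  | nil => rfl
  | cons y ys ih =>
    by_cases h : decide (kb (g x) < kb (g y)) = true
    · simp [PySem.List.insertBy, h]
    · simp [PySem.List.insertBy, Bool.eq_false_iff.mpr h, ih]

-- sorting a mapped list by a key of the image is the image of sorting by the composite key
lemma sorted_map_eq {α β κ : Type} [LT κ] [DecidableLT κ] (g : α → β) (kb : β → κ) (xs : List α) :
    PySem.List.sorted (xs.map g) kb false = (PySem.List.sorted xs (fun a => kb (g a)) false).map g := by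
  show List.foldl _ _ _ = _
  rw [show PySem.List.sorted xs (fun a => kb (g a)) false
        = xs.foldl (fun acc x => PySem.List.insertBy
            (fun a b => decide (kb (g a) < kb (g b))) x acc) [] from rfl]
  suffices h : ∀ (acc : List α),
      (xs.map g).foldl (fun acc x => PySem.List.insertBy (fun a b => decide (kb a < kb b)) x acc)
          (acc.map g)
        = (xs.foldl (fun acc x => PySem.List.insertBy
            (fun a b => decide (kb (g a) < kb (g b))) x acc) acc).map g by
    simpa using h []
  induction xs with
  | nil => intro acc; simp
  | cons x xs ih =>
    intro acc
    rw [List.map_cons, List.foldl_cons, List.foldl_cons, ← insertBy_map g kb x acc, ih]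

-- ===== VERDICT (by name: the statement is the Claim_ definition above) =====
-- reading B's stored pair through getD is reading the fold through map snd
lemma getD_snd (o : Option ((Int × Int × Int) × String)) :
    (o.getD ((0, 0, 0), "")).2 = (o.map Prod.snd).getD "" := by
  cases o <;> rfl

theorem pick_seed_urls_for_year_spec : Claim_equal_pick_seed_urls_for_year := by
  intro urls _hdom
  show pick_seed_urls_for_year urls = pick_seed_urls_for_year_alt urls
  have hA : pick_seed_urls_for_year urls =
      (PySem.List.sorted (urls.foldl stepA PySem.Dict.empty).items (fun p => p.1) false).map
        (fun p => (p.1,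
          (PySem.List.sorted p.2 (fun u => encScore (score_seed_url u p.1)) true).headD "")) := rfl
  have hB : pick_seed_urls_for_year_alt urls =
      (PySem.List.sorted (urls.foldl stepB PySem.Dict.empty).keys (fun k => k) false).map
        (fun k => (k, ((urls.foldl stepB PySem.Dict.empty).getD k ((0, 0, 0), "")).2)) := rfl
  rw [hA, hB]
  have hnd : (urls.foldl stepA PySem.Dict.empty).keys.Nodup :=
    nodup_keys_foldA urls _ (by simp [PySem.Dict.keys_empty])
  have hkeys : (urls.foldl stepA PySem.Dict.empty).keys = (urls.foldl stepB PySem.Dict.empty).keys :=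
    keys_eq urls _ _ (by simp [PySem.Dict.keys_empty])
  have hno : ∀ k ∈ (urls.foldl stepA PySem.Dict.empty).keys, k ≠ "other" :=
    no_other_foldA urls _ (by simp [PySem.Dict.keys_empty])
  rw [PySem.Dict.items_eq_map_keys _ hnd [],
      sorted_map_eq (fun k => (k, (urls.foldl stepA PySem.Dict.empty).getD k [])) (fun p => p.1),
      List.map_map, ← hkeys]
  refine List.map_congr_left ?_
  intro k hk
  have hkmem : k ∈ (urls.foldl stepA PySem.Dict.empty).keys := by
    rw [PySem.List.mem_sorted] at hk; exact hk
  have hko : k ≠ "other" := hno k hkmem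
  show (k, (PySem.List.sorted ((urls.foldl stepA PySem.Dict.empty).getD k [])
        (fun u => encScore (score_seed_url u k)) true).headD "")
      = (k, ((urls.foldl stepB PySem.Dict.empty).getD k ((0, 0, 0), "")).2)
  have hgrp : (urls.foldl stepA PySem.Dict.empty).getD k [] =
      urls.filter (fun u => infer_page_key u == k) := by
    rw [grouped_getD urls _ k hko, PySem.Dict.getD_empty]
    simp
  have hbst : (urls.foldl stepB PySem.Dict.empty).get? k =
      (urls.filter (fun u => infer_page_key u == k)).foldl (bstep k) none := by
    rw [best_get? urls _ k hko, PySem.Dict.get?_empty]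
  rw [hgrp, pick_eq_fold, PySem.Dict.getD, hbst, getD_snd]
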